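-- pv_equiv track=rewrite | github.com/ProphetSunboy/python_tasks | compute_decimal_representation.py | decimalRepresentation
-- ===== SOURCE A (Python) =====
-- from typing import List
--
-- def decimalRepresentation(n: int) -> List[int]:
--     """
--     Given a positive integer n, express n as a sum of base-10 components using
--     the fewest number of components possible.
--
--     A base-10 component is any positive integer that is the product of a single
--     digit (1-9) and a non-negative power of 10.
--     For example, 500, 30, and 7 are base-10 components, whereas 537, 102, and 11 are not.
--
--     Returns:
--         List[int]: A list of base-10 components that sum to n, sorted in descending order.
--
--     Example:
--         >>> decimalRepresentation(705904)
--         [700000, 5000, 900, 4]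
--         >>> decimalRepresentation(4020)
--         [4000, 20]
--
--     Time Complexity: O(log n), where n is the input integer (proportional to the number of digits).
--     Space Complexity: O(log n) for the output list.
--
--     LeetCode: Beats 100% of submissions
--     """
--     ans = []
--
--     i = 0
--     while n > 0:
--         curr = n % 10
--
--         if curr > 0:
--             ans.append(curr * 10**i)
--
--         n //= 10
--         i += 1
--
--     return ans[::-1]
-- ===== SOURCE B (Python) =====
-- from typing import List
--
-- def decimalRepresentation(n: int) -> List[int]:
--     if n <= 0:
--         return []
--     ans = []
--     p = 1
--     while p * 10 <= n:
--         p *= 10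
--     while p > 0:
--         d = n // p
--         if d > 0:
--             ans.append(d * p)
--         n -= d * p
--         p //= 10
--     return ans
-- ===== Notes on version B (the rewrite author's own statement) =====
-- stated objective: alternative
-- what changed: B emits components most-significant-digit first by first finding the highest power of ten <= n and then dividing downwards, so the list is built in final (descending) order with no reversal, instead of A's low-end digit peeling followed by ans[::-1].
import Mathlib
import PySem

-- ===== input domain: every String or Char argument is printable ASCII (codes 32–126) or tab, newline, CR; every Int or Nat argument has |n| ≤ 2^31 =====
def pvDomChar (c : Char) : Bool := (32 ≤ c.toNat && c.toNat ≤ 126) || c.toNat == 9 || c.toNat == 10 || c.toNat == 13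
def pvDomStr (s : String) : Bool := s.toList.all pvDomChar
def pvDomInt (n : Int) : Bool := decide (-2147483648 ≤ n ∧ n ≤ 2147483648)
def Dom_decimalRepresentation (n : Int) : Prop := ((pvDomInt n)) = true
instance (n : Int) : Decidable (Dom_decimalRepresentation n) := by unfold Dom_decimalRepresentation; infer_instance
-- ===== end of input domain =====

-- B rebuilds the list most-significant-digit first (largest power of ten downwards), no reversal;
-- A peels digits from the low end and reverses. Objective: alternative (same O(log n) cost).

-- ===== PORT A =====
-- while n > 0: curr = n % 10; if curr > 0: ans.append(curr * 10**i); n //= 10; i += 1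
def pvALoop (n : Int) (i : Nat) (ans : List Int) : List Int :=
  if _h : n > 0 then
    pvALoop (PySem.Int.floordiv n 10) (i + 1)
      (ans ++ (if PySem.Int.mod n 10 > 0 then [PySem.Int.mod n 10 * 10 ^ i] else []))
  else ans
termination_by n.toNat
decreasing_by
  rw [PySem.Int.floordiv_eq_ediv_of_pos (by norm_num)]
  omega

def decimalRepresentation (n : Int) : List Int :=
  -- return ans[::-1]  (slice?_none_none_neg_one: xs[::-1] = xs.reverse)
  (pvALoop n 0 []).reverse

-- ===== PORT B =====
-- while p * 10 <= n: p *= 10   (fuel n.toNat only makes the loop total; pvBFind_spec shows it never runs out)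
def pvBFind (fuel : Nat) (n p : Int) : Int :=
  match fuel with
  | 0 => p
  | f + 1 => if p * 10 ≤ n then pvBFind f n (p * 10) else p

-- while p > 0: d = n // p; if d > 0: ans.append(d * p); n -= d * p; p //= 10
def pvBLoop (n p : Int) (ans : List Int) : List Int :=
  if _h : p > 0 then
    pvBLoop (n - PySem.Int.floordiv n p * p) (PySem.Int.floordiv p 10)
      (ans ++ (if PySem.Int.floordiv n p > 0 then [PySem.Int.floordiv n p * p] else []))
  else ans
termination_by p.toNat
decreasing_by
  rw [PySem.Int.floordiv_eq_ediv_of_pos (by norm_num)]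
  omega

def decimalRepresentation_alt (n : Int) : List Int :=
  if n ≤ 0 then [] else pvBLoop n (pvBFind n.toNat n 1) []

-- ===== PRECONDITION & SPEC =====
def Spec_decimalRepresentation (n : Int) (out : List Int) : Prop := out = decimalRepresentation_alt n
instance (n : Int) (out : List Int) : Decidable (Spec_decimalRepresentation n out) := by unfold Spec_decimalRepresentation; infer_instance

-- ===== CLAIM (what is proved, stated in full; the proofs are below) =====
def Claim_equal_decimalRepresentation : Prop := ∀ (n : Int), Dom_decimalRepresentation n → Spec_decimalRepresentation n (decimalRepresentation n)

-- ===== LEMMAS AND PROOFS =====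

-- Reference: the low-to-high component list of n (exponent i on the current digit).
def pvComps (n : Int) (i : Nat) : List Int :=
  if _h : n > 0 then
    (if n % 10 > 0 then [n % 10 * 10 ^ i] else []) ++ pvComps (n / 10) (i + 1)
  else []
termination_by n.toNat
decreasing_by omega

theorem pvComps_nonpos {n : Int} (h : ¬ n > 0) (i : Nat) : pvComps n i = [] := by
  rw [pvComps]; simp [h]

theorem pvComps_unfold {n : Int} (h : 0 ≤ n) (i : Nat) :
    pvComps n i = (if n % 10 > 0 then [n % 10 * 10 ^ i] else []) ++ pvComps (n / 10) (i + 1) := by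
  rcases lt_or_eq_of_le h with h' | h'
  · rw [pvComps]; simp [h']
  · subst h'
    norm_num [pvComps_nonpos (show ¬ (0:Int) > 0 by norm_num)]

theorem pvALoop_eq (n : Int) (i : Nat) (ans : List Int) :
    pvALoop n i ans = ans ++ pvComps n i := by
  induction n, i, ans using pvALoop.induct with
  | case1 n i ans h ih =>
    rw [pvALoop]
    simp only [h, dite_true]
    simp only [dite_eq_ite] at ih
    rw [ih]
    conv_rhs => rw [pvComps]
    simp only [h, dite_true]
    rw [PySem.Int.floordiv_eq_ediv_of_pos (by norm_num),
        PySem.Int.mod_eq_emod_of_pos (by norm_num)]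
    simp
  | case2 n i ans h =>
    rw [pvALoop]
    simp [h, pvComps_nonpos h]

-- Splitting off the top digit: for m < 10^(j+1) and a digit d,
-- comps (m + d·10^(j+1)) = comps m ++ (that top component, if nonzero).
theorem pvComps_split (j : Nat) : ∀ (i : Nat) (m d : Int), 0 ≤ m → m < 10 ^ (j + 1) →
    0 ≤ d → d < 10 →
    pvComps (m + d * 10 ^ (j + 1)) i
      = pvComps m i ++ (if d > 0 then [d * 10 ^ (i + j + 1)] else []) := by
  induction j with
  | zero =>
    intro i m d hm0 hm hd0 hd
    simp only [Nat.zero_add, pow_one] at hm ⊢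
    rw [pvComps_unfold (by positivity) i]
    have h1 : (m + d * 10) % 10 = m := by omega
    have h2 : (m + d * 10) / 10 = d := by omega
    rw [h1, h2, pvComps_unfold hd0 (i + 1)]
    have h3 : d % 10 = d := by omega
    have h4 : d / 10 = 0 := by omega
    rw [h3, h4, pvComps_nonpos (by norm_num) (i + 1 + 1)]
    rw [pvComps_unfold hm0 i]
    have h5 : m % 10 = m := by omega
    have h6 : m / 10 = 0 := by omega
    rw [h5, h6, pvComps_nonpos (by norm_num) (i + 1)]
    simp
  | succ j ih =>
    intro i m d hm0 hm hd0 hd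
    have hp : (0:Int) < 10 ^ (j + 1) := by positivity
    rw [pvComps_unfold (by positivity) i]
    have h10 : (10:Int) ^ (j + 1 + 1) = 10 ^ (j + 1) * 10 := by ring
    have h1 : (m + d * 10 ^ (j + 1 + 1)) % 10 = m % 10 := by
      rw [h10, ← mul_assoc]
      omega
    have h2 : (m + d * 10 ^ (j + 1 + 1)) / 10 = m / 10 + d * 10 ^ (j + 1) := by
      rw [h10, ← mul_assoc]
      omega
    rw [h1, h2, ih (i + 1) (m / 10) d (by omega) (by omega) hd0 hd]
    rw [pvComps_unfold hm0 i]
    have : i + 1 + j + 1 = i + (j + 1) + 1 := by omega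
    rw [this]
    simp [List.append_assoc]

theorem pvBLoop_eq (j : Nat) : ∀ (n : Int) (ans : List Int), 0 ≤ n → n < 10 ^ (j + 1) →
    pvBLoop n (10 ^ j) ans = ans ++ (pvComps n 0).reverse := by
  induction j with
  | zero =>
    intro n ans hn0 hn
    rw [pvBLoop]
    simp only [pow_zero] at *
    rw [PySem.Int.floordiv_eq_ediv_of_pos (by norm_num : (0:Int) < 1)]
    have hd : n / 1 = n := by omega
    rw [hd]
    simp only [show (0:Int) < 1 from by norm_num, dite_true]
    rw [PySem.Int.floordiv_eq_ediv_of_pos (by norm_num : (0:Int) < 10)]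
    have : (1:Int) / 10 = 0 := by norm_num
    rw [this, pvBLoop]
    simp only [show ¬ (0:Int) > 0 from by norm_num, dite_false]
    rw [pvComps_unfold hn0 0]
    have h5 : n % 10 = n := by omega
    have h6 : n / 10 = 0 := by omega
    rw [h5, h6, pvComps_nonpos (by norm_num) 1]
    by_cases hpos : (0:Int) < n <;> simp [hpos]
  | succ j ih =>
    intro n ans hn0 hn
    have hp : (0:Int) < 10 ^ (j + 1) := by positivity
    rw [pvBLoop]
    simp only [hp, dite_true]
    rw [PySem.Int.floordiv_eq_ediv_of_pos hp,
        PySem.Int.floordiv_eq_ediv_of_pos (by norm_num : (0:Int) < 10)]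
    have hq : (10:Int) ^ (j + 1) / 10 = 10 ^ j := by
      rw [pow_succ]
      exact Int.mul_ediv_cancel _ (by norm_num)
    rw [hq]
    set d := n / 10 ^ (j + 1) with hdd
    have hrem : n - d * 10 ^ (j + 1) = n % 10 ^ (j + 1) := by
      rw [hdd, Int.emod_def]; ring
    have hr0 : 0 ≤ n % 10 ^ (j + 1) := Int.emod_nonneg _ (by positivity)
    have hrlt : n % 10 ^ (j + 1) < 10 ^ (j + 1) := Int.emod_lt_of_pos _ hp
    rw [hrem, ih _ _ hr0 hrlt]
    have hd0 : 0 ≤ d := Int.ediv_nonneg hn0 (le_of_lt hp)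
    have hdlt : d < 10 := by
      rw [hdd, Int.ediv_lt_iff_lt_mul hp]
      calc n < 10 ^ (j + 1 + 1) := hn
        _ = 10 * 10 ^ (j + 1) := by ring
    have hsplit : pvComps n 0 = pvComps (n % 10 ^ (j + 1)) 0
        ++ (if d > 0 then [d * 10 ^ (0 + j + 1)] else []) := by
      have hn' : n = n % 10 ^ (j + 1) + d * 10 ^ (j + 1) := by
        rw [hdd, Int.emod_def]; ring
      calc pvComps n 0 = pvComps (n % 10 ^ (j + 1) + d * 10 ^ (j + 1)) 0 := by rw [← hn']
        _ = _ := pvComps_split j 0 _ d hr0 hrlt hd0 hdlt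
    rw [hsplit]
    simp only [Nat.zero_add, List.reverse_append, List.append_assoc]
    by_cases hdpos : d > 0 <;> simp [hdpos]

theorem pvBFind_spec : ∀ (fuel : Nat) (p n : Int), 0 < p → p ≤ n → n < p * 10 ^ fuel →
    ∃ k : Nat, pvBFind fuel n p = p * 10 ^ k ∧ p * 10 ^ k ≤ n ∧ n < p * 10 ^ (k + 1) := by
  intro fuel
  induction fuel with
  | zero =>
    intro p n hp hpn hlt
    simp at hlt
    omega
  | succ f ih =>
    intro p n hp hpn hlt
    rw [pvBFind]
    by_cases h : p * 10 ≤ n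
    · simp only [h, if_true]
      have hlt' : n < p * 10 * 10 ^ f := by
        have : p * 10 ^ (f + 1) = p * 10 * 10 ^ f := by ring
        omega
      obtain ⟨k, hfind, hle, hlt2⟩ := ih (p * 10) n (by positivity) h hlt'
      refine ⟨k + 1, ?_, ?_, ?_⟩
      · rw [hfind]; ring
      · calc p * 10 ^ (k + 1) = p * 10 * 10 ^ k := by ring
          _ ≤ n := hle
      · calc n < p * 10 * 10 ^ (k + 1) := hlt2
          _ = p * 10 ^ (k + 1 + 1) := by ring
    · simp only [h, if_false]
      exact ⟨0, by ring_nf, by simpa using hpn, by simpa using lt_of_not_ge h⟩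

theorem pv_lt_pow_self (m : Nat) : (m : Int) < 10 ^ m := by
  induction m with
  | zero => norm_num
  | succ k ih =>
    have : (10:Int) ^ (k + 1) = 10 * 10 ^ k := by ring
    push_cast
    omega

-- ===== VERDICT (by name: the statement is the Claim_ definition above) =====
theorem decimalRepresentation_spec : Claim_equal_decimalRepresentation := by
  intro n _
  unfold Spec_decimalRepresentation decimalRepresentation decimalRepresentation_alt
  by_cases hn : n ≤ 0
  · simp [hn, pvALoop_eq, pvComps_nonpos (show ¬ n > 0 by omega)]
  · simp only [hn, if_false]
    have hn' : 0 < n := by omega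
    have hfuel : n < 1 * 10 ^ n.toNat := by
      have := pv_lt_pow_self n.toNat
      omega
    obtain ⟨k, hfind, hle, hlt⟩ := pvBFind_spec n.toNat 1 n (by norm_num) (by omega) hfuel
    rw [hfind]
    simp only [one_mul] at *
    rw [pvBLoop_eq k n [] (by omega) hlt, pvALoop_eq]
    simp
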